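-- pv_equiv track=rewrite | github.com/skoolkid/skoolkit | utils/tap2sna.py | get_z80_ram_block
-- ===== SOURCE A (Python) =====
-- def get_z80_ram_block(data, page):
--     block = []
--     prev_b = data[0]
--     count = 1
--     for b in data[1:] + [-1]:
--         if b == prev_b:
--             if count < 255:
--                 count += 1
--                 continue
--         if count > 4 or (prev_b == 237 and count > 1):
--             block += [237, 237, count, prev_b]
--         else:
--             block += [prev_b] * count
--         prev_b = b
--         count = 1
--     length = len(block)
--     return [length % 256, length // 256, page] + block
-- ===== SOURCE B (Python) =====
-- def _chunks(n):
--     # split a run length n >= 1 into pieces of at most 255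
--     return [255] * ((n - 1) // 255) + [(n - 1) % 255 + 1]
--
-- def _rle(xs):
--     # run-length encoding: list of (value, run length); each outer step
--     # consumes the maximal equal prefix starting at i
--     runs = []
--     i = 0
--     while i < len(xs):
--         k = i + 1
--         while k < len(xs) and xs[k] == xs[i]:
--             k += 1
--         runs.append((xs[i], k - i))
--         i = k
--     return runs
--
-- def get_z80_ram_block(data, page):
--     # encode the runs of data + [-1]; the very last chunk (the sentinel's
--     # pending run) is never emitted, exactly as in the original flush logic
--     block = []
--     groups = _rle(list(data) + [-1])
--     for i, (v, n) in enumerate(groups):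
--         chunks = _chunks(n)
--         if i == len(groups) - 1:
--             chunks = chunks[:-1]
--         for c in chunks:
--             if c > 4 or (v == 237 and c > 1):
--                 block += [237, 237, c, v]
--             else:
--                 block += [v] * c
--     length = len(block)
--     return [length % 256, length // 256, page] + block
-- ===== Notes on version B (the rewrite author's own statement) =====
-- stated objective: alternative
-- what changed: Replaces A's single stateful flush loop (prev_b/count state with in-loop continue) by an explicit decomposition: run-length-encode data plus the sentinel, split each run into <=255 chunks with a closed-form chunk list, emit each chunk, dropping the final pending chunk.
import Mathlib
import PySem

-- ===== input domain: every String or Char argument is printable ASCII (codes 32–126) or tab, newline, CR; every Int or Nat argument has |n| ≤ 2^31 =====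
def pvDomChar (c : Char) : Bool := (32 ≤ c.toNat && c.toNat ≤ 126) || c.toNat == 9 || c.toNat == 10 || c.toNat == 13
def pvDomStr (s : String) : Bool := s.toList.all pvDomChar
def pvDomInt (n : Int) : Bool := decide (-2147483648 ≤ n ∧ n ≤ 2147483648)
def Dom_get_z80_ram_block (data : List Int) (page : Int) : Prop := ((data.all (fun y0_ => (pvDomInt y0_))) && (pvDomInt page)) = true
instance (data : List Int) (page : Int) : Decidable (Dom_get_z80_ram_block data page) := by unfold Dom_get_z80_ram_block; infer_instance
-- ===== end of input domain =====

-- B re-implements the RLE encoder by an explicit decomposition (run-length groups, then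
-- chunk splitting) instead of A's single stateful flush loop; objective: alternative, not faster.

-- ===== PORT A =====
-- loop body of A: state (block, prev_b, count); count is kept as a Nat (in Python it is
-- an int that starts at 1 and only ever grows, so it is always a nonnegative int)
def stepA (st : List Int × Int × Nat) (b : Int) : List Int × Int × Nat :=
  let (block, prev, count) := st
  if b = prev ∧ count < 255 then (block, prev, count + 1)
  else
    ((if 4 < count ∨ (prev = 237 ∧ 1 < count) then
        block ++ [237, 237, (count : Int), prev]
      else
        block ++ List.replicate count prev), b, 1)

def get_z80_ram_block (data : List Int) (page : Int) : List Int :=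
  match data with
  | [] => []  -- Python raises IndexError here (data[0]); excluded by Pre_
  | d0 :: rest =>
    let r := (rest ++ [-1]).foldl stepA ([], d0, 1)
    let block := r.1
    [PySem.Int.mod (block.length : Int) 256, PySem.Int.floordiv (block.length : Int) 256, page] ++ block

-- ===== PORT B =====
-- _chunks(n): split a run length n >= 1 into pieces of at most 255
def chunksB (n : Nat) : List Nat := List.replicate ((n - 1) / 255) 255 ++ [(n - 1) % 255 + 1]

-- _rle(xs): run-length encoding; each outer step of the while loop consumes the maximal equal
-- prefix (k - i = 1 + length of the equal takeWhile prefix) and recurses on the rest (dropWhile)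
def rleL : List Int → List (Int × Nat)
  | [] => []
  | x :: xs =>
    (x, (xs.takeWhile (fun y => y == x)).length + 1) :: rleL (xs.dropWhile (fun y => y == x))
  termination_by xs => xs.length
  decreasing_by
    simp only [List.length_cons]
    exact Nat.lt_succ_of_le (List.length_dropWhile_le _ _)

-- the inner 'for c in chunks' body
def emitChunk (v : Int) (c : Nat) : List Int :=
  if 4 < c ∨ (v = 237 ∧ 1 < c) then [237, 237, (c : Int), v] else List.replicate c v

-- the 'for i, (v, n) in enumerate(groups)' loop; the 'i == len(groups) - 1' test becomes
-- the structural "last element" case, where chunks loses its final element (chunks[:-1])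
def emitGroups : List (Int × Nat) → List Int
  | [] => []
  | [(v, n)] => ((chunksB n).dropLast.map (emitChunk v)).flatten
  | (v, n) :: g :: rest => ((chunksB n).map (emitChunk v)).flatten ++ emitGroups (g :: rest)

def get_z80_ram_block_alt (data : List Int) (page : Int) : List Int :=
  let block := emitGroups (rleL (data ++ [-1]))
  [PySem.Int.mod (block.length : Int) 256, PySem.Int.floordiv (block.length : Int) 256, page] ++ block

-- ===== PRECONDITION & SPEC =====
-- Pre_ excludes only the empty list, on which A raises IndexError (data[0]).
def Pre_get_z80_ram_block (data : List Int) (page : Int) : Prop := data ≠ []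
instance (data : List Int) (page : Int) : Decidable (Pre_get_z80_ram_block data page) := by
  unfold Pre_get_z80_ram_block; infer_instance

def pvWitness_get_z80_ram_block : List Int × Int := ([0, 0, 0, 0, 0, 1, 237], 3)

def Spec_get_z80_ram_block (data : List Int) (page : Int) (out : List Int) : Prop :=
  out = get_z80_ram_block_alt data page
instance (data : List Int) (page : Int) (out : List Int) : Decidable (Spec_get_z80_ram_block data page out) := by
  unfold Spec_get_z80_ram_block; infer_instance

-- ===== CLAIM (what is proved, stated in full; the proofs are below) =====
def Claim_equal_get_z80_ram_block : Prop := ∀ (data : List Int) (page : Int), Dom_get_z80_ram_block data page → Pre_get_z80_ram_block data page → Spec_get_z80_ram_block data page (get_z80_ram_block data page)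

-- ===== LEMMAS AND PROOFS =====

-- the pending run (value v, current count c) merged with the upcoming bytes ys
def mergeRle (v : Int) (c : Nat) (ys : List Int) : List (Int × Nat) :=
  (v, c + (ys.takeWhile (fun y => y == v)).length) :: rleL (ys.dropWhile (fun y => y == v))

theorem chunksB_small {c : Nat} (h1 : 1 ≤ c) (h2 : c ≤ 255) : chunksB c = [c] := by
  have h : c - 1 < 255 := by omega
  simp [chunksB, Nat.div_eq_of_lt h, Nat.mod_eq_of_lt h]
  omega

theorem chunksB_ne_nil (n : Nat) : chunksB n ≠ [] := by
  simp [chunksB]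

theorem chunksB_add255 {n : Nat} (h : 1 ≤ n) : chunksB (n + 255) = 255 :: chunksB n := by
  have e1 : n + 255 - 1 = (n - 1) + 255 := by omega
  simp [chunksB, e1, Nat.add_div_right, Nat.add_mod_right, List.replicate_succ]

theorem emitGroups_add255 {v : Int} {n : Nat} (h : 1 ≤ n) (rest : List (Int × Nat)) :
    emitGroups ((v, n + 255) :: rest) = emitChunk v 255 ++ emitGroups ((v, n) :: rest) := by
  cases rest with
  | nil =>
    simp [emitGroups, chunksB_add255 h, List.dropLast_cons_of_ne_nil (chunksB_ne_nil n)]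
  | cons g r =>
    simp [emitGroups, chunksB_add255 h]

theorem mergeRle_eq_rleL (v : Int) (ys : List Int) :
    mergeRle v 1 ys = rleL (v :: ys) := by
  simp [mergeRle, rleL, Nat.add_comm]

theorem loop_invariant (ys : List Int) : ∀ (block : List Int) (v : Int) (c : Nat),
    1 ≤ c → c ≤ 255 →
    (ys.foldl stepA (block, v, c)).1 = block ++ emitGroups (mergeRle v c ys) := by
  induction ys with
  | nil =>
    intro block v c h1 h2
    simp [mergeRle, rleL, emitGroups, chunksB_small h1 h2]
  | cons b ys' ih =>
    intro block v c h1 h2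
    simp only [List.foldl_cons]
    by_cases hb : b = v ∧ c < 255
    · obtain ⟨hbv, hc⟩ := hb
      have hstep : stepA (block, v, c) b = (block, v, c + 1) := by
        simp [stepA, hbv, hc]
      rw [hstep, ih block v (c + 1) (by omega) (by omega)]
      subst hbv
      simp [mergeRle, List.takeWhile, List.dropWhile]
      ring_nf
    · by_cases hbv : b = v
      · -- then c = 255: emit a 255-chunk, continue the same run with count 1
        have hc : c = 255 := by omega
        subst hc; subst hbv
        have hstep : stepA (block, b, 255) b = (block ++ [237, 237, (255 : Int), b], b, 1) := by
          simp [stepA]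
        rw [hstep, ih _ b 1 (by omega) (by omega)]
        have hm : mergeRle b 255 (b :: ys')
            = (b, (1 + (ys'.takeWhile (fun y => y == b)).length) + 255)
              :: rleL (ys'.dropWhile (fun y => y == b)) := by
          simp [mergeRle, List.takeWhile, List.dropWhile]
          ring_nf
        rw [hm]
        have := emitGroups_add255 (v := b)
          (n := 1 + (ys'.takeWhile (fun y => y == b)).length) (by omega)
          (rleL (ys'.dropWhile (fun y => y == b)))
        rw [this]
        have hmb : mergeRle b 1 ys'
            = (b, 1 + (ys'.takeWhile (fun y => y == b)).length)
              :: rleL (ys'.dropWhile (fun y => y == b)) := by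
          simp [mergeRle]
        rw [hmb]
        simp [emitChunk]
      · -- boundary: flush the pending run, start a fresh run on b
        have hstep : stepA (block, v, c) b = (block ++ emitChunk v c, b, 1) := by
          simp only [stepA, emitChunk]
          split_ifs <;> simp_all
        rw [hstep, ih _ b 1 (by omega) (by omega)]
        have hbe : (b == v) = false := by simp [hbv]
        have hm : mergeRle v c (b :: ys') = (v, c) :: mergeRle b 1 ys' := by
          simp [mergeRle, hbe, rleL, Nat.add_comm]
        rw [hm]
        have : emitGroups ((v, c) :: mergeRle b 1 ys')
            = ((chunksB c).map (emitChunk v)).flatten ++ emitGroups (mergeRle b 1 ys') := by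
          simp [mergeRle, emitGroups]
        rw [this, chunksB_small h1 h2]
        simp

-- ===== VERDICT (by name: the statement is the Claim_ definition above) =====
theorem get_z80_ram_block_spec : Claim_equal_get_z80_ram_block := by
  intro data page _ hpre
  unfold Spec_get_z80_ram_block
  match data with
  | [] => exact absurd rfl hpre
  | d0 :: rest =>
    unfold get_z80_ram_block get_z80_ram_block_alt
    have h := loop_invariant (rest ++ [-1]) [] d0 1 (by omega) (by omega)
    simp only [List.nil_append] at h
    simp only [List.cons_append]
    rw [h, ← mergeRle_eq_rleL]
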